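-- pv_equiv track=rewrite | github.com/seccomp/libseccomp | src/arch-update-syscalls-csv.py | insert_new_syscall
-- ===== SOURCE A (Python) =====
-- def insert_new_syscall(syscalls, syscall_name, column_cnt):
--     inserted = False
--
--     for syscall in syscalls:
--         if syscall_name < syscall:
--             idx = list(syscalls.keys()).index(syscall)
--             syscalls_list = list(syscalls.items())
--             syscalls_list.insert(idx, (syscall_name, ['PNR'] * column_cnt))
--             syscalls = dict(syscalls_list)
--             inserted = True
--             break
--
--     if not inserted:
--         syscalls[syscall_name] = ['PNR'] * column_cnt
--
--     return syscalls
-- ===== SOURCE B (Python) =====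
-- def insert_new_syscall(syscalls, syscall_name, column_cnt):
--     # Single constructive pass with an 'inserted' flag instead of A's
--     # find-index / list() / list.insert / dict() rebuild chain.
--     # Like A, mutates the argument in place only in the append branch.
--     if any(syscall_name < s for s in syscalls):
--         new_syscalls = {}
--         inserted = False
--         for name, row in syscalls.items():
--             if not inserted and syscall_name < name:
--                 new_syscalls[syscall_name] = ['PNR'] * column_cnt
--                 inserted = True
--             new_syscalls[name] = row
--         return new_syscalls
--     syscalls[syscall_name] = ['PNR'] * column_cnt
--     return syscalls
-- ===== Notes on version B (the rewrite author's own statement) =====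
-- stated objective: simpler
-- what changed: A breaks out of the scan to run a .keys().index lookup, an items() copy, a list.insert and a dict() rebuild; B builds the result dict in one constructive pass over items() with an 'inserted' flag (append branch kept mutating in place like A).
import Mathlib
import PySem

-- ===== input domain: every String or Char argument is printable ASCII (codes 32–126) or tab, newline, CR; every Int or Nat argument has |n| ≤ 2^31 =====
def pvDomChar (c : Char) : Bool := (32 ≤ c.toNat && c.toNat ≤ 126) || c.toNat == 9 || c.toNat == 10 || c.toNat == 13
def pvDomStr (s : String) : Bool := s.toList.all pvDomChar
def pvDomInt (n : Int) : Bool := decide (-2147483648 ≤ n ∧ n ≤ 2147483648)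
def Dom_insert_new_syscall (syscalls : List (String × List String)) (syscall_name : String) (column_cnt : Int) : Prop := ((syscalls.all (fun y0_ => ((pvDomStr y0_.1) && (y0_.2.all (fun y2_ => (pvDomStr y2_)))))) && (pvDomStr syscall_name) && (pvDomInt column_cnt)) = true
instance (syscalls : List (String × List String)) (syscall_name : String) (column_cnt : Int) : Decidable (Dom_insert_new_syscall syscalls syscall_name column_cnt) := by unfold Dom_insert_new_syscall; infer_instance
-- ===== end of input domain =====

-- B replaces A's find-index / list-copy / list.insert / dict() rebuild chain by one
-- constructive pass over the items with an 'inserted' flag (simpler, same O(n));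
-- like A, B mutates the argument only in the append branch — equivalence here is
-- about the return value (and in fact both Pythons perform the same mutation).


-- ===== PORT A =====
-- 'for syscall in syscalls: if syscall_name < syscall: … break' — first key greater than syscall_name
def pvAFind (syscall_name : String) : List (String × List String) → Option String
  | [] => none
  | (k, _) :: rest => if syscall_name < k then some k else pvAFind syscall_name rest

def insert_new_syscall (syscalls : List (String × List String)) (syscall_name : String) (column_cnt : Int) : List (String × List String) :=
  match pvAFind syscall_name syscalls with
  | some syscall =>
      -- idx = list(syscalls.keys()).index(syscall)   (always found, so getD 0 is never used)
      let idx : Nat := (PySem.List.index? (syscalls.map Prod.fst) syscall).getD 0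
      -- syscalls_list = list(syscalls.items()); syscalls_list.insert(idx, …); syscalls = dict(syscalls_list)
      let syscalls_list := PySem.List.insert syscalls (idx : Int) (syscall_name, PySem.List.pyRepeat ["PNR"] column_cnt)
      (PySem.Dict.ofList syscalls_list).items
  | none =>
      -- syscalls[syscall_name] = ['PNR'] * column_cnt
      ((PySem.Dict.mk syscalls).insert syscall_name (PySem.List.pyRepeat ["PNR"] column_cnt)).items

-- ===== PORT B =====
-- the one-pass loop: 'for name, row in syscalls.items(): if not inserted and syscall_name < name: new[syscall_name] = pnr; inserted = True; new[name] = row'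
def pvBuild (syscall_name : String) (pnr : List String) :
    List (String × List String) → Bool → PySem.Dict String (List String) → PySem.Dict String (List String)
  | [], _, new => new
  | (name, row) :: rest, inserted, new =>
      if !inserted && decide (syscall_name < name) then
        pvBuild syscall_name pnr rest true ((new.insert syscall_name pnr).insert name row)
      else
        pvBuild syscall_name pnr rest inserted (new.insert name row)

def insert_new_syscall_alt (syscalls : List (String × List String)) (syscall_name : String) (column_cnt : Int) : List (String × List String) :=
  if syscalls.any (fun p => decide (syscall_name < p.1)) then
    (pvBuild syscall_name (PySem.List.pyRepeat ["PNR"] column_cnt) syscalls false PySem.Dict.empty).items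
  else
    ((PySem.Dict.mk syscalls).insert syscall_name (PySem.List.pyRepeat ["PNR"] column_cnt)).items

-- ===== PRECONDITION & SPEC =====
def Spec_insert_new_syscall (syscalls : List (String × List String)) (syscall_name : String) (column_cnt : Int) (out : List (String × List String)) : Prop := out = insert_new_syscall_alt syscalls syscall_name column_cnt
instance (syscalls : List (String × List String)) (syscall_name : String) (column_cnt : Int) (out : List (String × List String)) : Decidable (Spec_insert_new_syscall syscalls syscall_name column_cnt out) := by unfold Spec_insert_new_syscall; infer_instance

-- ===== CLAIM (what is proved, stated in full; the proofs are below) =====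
def Claim_equal_insert_new_syscall : Prop := ∀ (syscalls : List (String × List String)) (syscall_name : String) (column_cnt : Int), Dom_insert_new_syscall syscalls syscall_name column_cnt → Spec_insert_new_syscall syscalls syscall_name column_cnt (insert_new_syscall syscalls syscall_name column_cnt)

-- ===== LEMMAS AND PROOFS =====

-- proof-side picture of the inserted list: (name, pnr) goes just before the first greater key
def pvIns (syscall_name : String) (pnr : List String) : List (String × List String) → List (String × List String)
  | [] => []
  | (k, v) :: rest =>
      if syscall_name < k then (syscall_name, pnr) :: (k, v) :: rest
      else (k, v) :: pvIns syscall_name pnr rest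

lemma pvAFind_none_iff (name : String) (l : List (String × List String)) :
    pvAFind name l = none ↔ l.any (fun p => decide (name < p.1)) = false := by
  induction l with
  | nil => simp [pvAFind]
  | cons p rest ih =>
      obtain ⟨k, v⟩ := p
      by_cases h : name < k
      · rw [pvAFind, if_pos h]
        simp only [List.any_cons, decide_eq_true h, Bool.true_or]
        simp
      · rw [pvAFind, if_neg h]
        simp only [List.any_cons, decide_eq_false h, Bool.false_or]
        exact ih

lemma pvAFind_lt {name k : String} {l : List (String × List String)}
    (h : pvAFind name l = some k) : name < k := by
  induction l with
  | nil => simp [pvAFind] at h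
  | cons p rest ih =>
      obtain ⟨k0, v0⟩ := p
      by_cases h0 : name < k0
      · simp [pvAFind, h0] at h; exact h ▸ h0
      · simp [pvAFind, h0] at h; exact ih h

-- A's find-index-then-insert produces exactly pvIns
lemma insert_idx_eq_pvIns {name k : String} (pnr : List String)
    {l : List (String × List String)} (h : pvAFind name l = some k) :
    ∃ i, PySem.List.index? (l.map Prod.fst) k = some i ∧
      PySem.List.insert l (i : Int) (name, pnr) = pvIns name pnr l := by
  induction l with
  | nil => simp [pvAFind] at h
  | cons p rest ih =>
      obtain ⟨k0, v0⟩ := p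
      by_cases h0 : name < k0
      · have hk : k = k0 := by simp [pvAFind, h0] at h; exact h.symm
        subst hk
        refine ⟨0, ?_, ?_⟩
        · simpa using PySem.List.index?_cons_self k (rest.map Prod.fst)
        · simp [PySem.List.insert_zero, pvIns, h0]
      · have h' : pvAFind name rest = some k := by simpa [pvAFind, h0] using h
        obtain ⟨i, hi, hins⟩ := ih h'
        have hk0 : k0 ≠ k := by
          intro he; exact h0 (he ▸ pvAFind_lt h')
        refine ⟨i + 1, ?_, ?_⟩
        · rw [List.map_cons, PySem.List.index?_cons_of_ne _ hk0, hi]; rfl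
        · obtain ⟨hlt, -, -⟩ := PySem.List.getElem_of_index?_eq_some hi
          have hle : i ≤ rest.length := by simpa using Nat.le_of_lt hlt
          rw [PySem.List.insert_natCast _ _ _ (by simpa using Nat.succ_le_succ hle)]
          rw [PySem.List.insert_natCast _ _ _ hle] at hins
          simp [List.take_succ_cons, List.drop_succ_cons, pvIns, h0, hins]

-- B's one-pass build is the fold of inserts over the pvIns list
lemma pvBuild_true (name : String) (pnr : List String)
    (l : List (String × List String)) (d : PySem.Dict String (List String)) :
    pvBuild name pnr l true d = l.foldl (fun acc p => acc.insert p.1 p.2) d := by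
  induction l generalizing d with
  | nil => rfl
  | cons p rest ih => obtain ⟨k, v⟩ := p; simp [pvBuild, ih]

lemma pvBuild_false (name : String) (pnr : List String)
    (l : List (String × List String)) (d : PySem.Dict String (List String)) :
    pvBuild name pnr l false d = (pvIns name pnr l).foldl (fun acc p => acc.insert p.1 p.2) d := by
  induction l generalizing d with
  | nil => rfl
  | cons p rest ih =>
      obtain ⟨k, v⟩ := p
      by_cases h : name < k
      · simp [pvBuild, pvIns, h, pvBuild_true]
      · simp [pvBuild, pvIns, h, ih]

-- ===== VERDICT (by name: the statement is the Claim_ definition above) =====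
theorem insert_new_syscall_spec : Claim_equal_insert_new_syscall := by
  intro syscalls name cnt _
  unfold Spec_insert_new_syscall insert_new_syscall insert_new_syscall_alt
  cases hf : pvAFind name syscalls with
  | none =>
      rw [(pvAFind_none_iff name syscalls).mp hf]
      rfl
  | some k =>
      have hany : syscalls.any (fun p => decide (name < p.1)) = true := by
        by_contra hc
        rw [(pvAFind_none_iff name syscalls).mpr (by simpa using hc)] at hf
        simp at hf
      rw [hany]
      simp only [if_true]
      obtain ⟨i, hi, hins⟩ := insert_idx_eq_pvIns (PySem.List.pyRepeat ["PNR"] cnt) hf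
      rw [hi]
      simp only [Option.getD_some, hins, pvBuild_false]
      rfl
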